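-- pv_equiv track=rewrite | github.com/chinkhor/VarCHEK | analyzeVar.py | findFeatureCount
-- ===== SOURCE A (Python) =====
-- def findFeatureCount(line):
--     if '&&' not in line and '||' not in line:
--         return 1
--     else:
--         count = 0
--         elements = line.split('&&')
--         for element in elements:
--             term = element.split('||')
--             count += len(term)
--         return count
-- ===== SOURCE B (Python) =====
-- def findFeatureCount(line):
--     return line.count('&&') + line.count('||') + 1
-- ===== Notes on version B (the rewrite author's own statement) =====
-- stated objective: simpler
-- what changed: B replaces the guard branch and the split-then-loop summation with a single closed-form expression line.count('&&') + line.count('||') + 1, building no intermediate lists.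
import Mathlib
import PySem

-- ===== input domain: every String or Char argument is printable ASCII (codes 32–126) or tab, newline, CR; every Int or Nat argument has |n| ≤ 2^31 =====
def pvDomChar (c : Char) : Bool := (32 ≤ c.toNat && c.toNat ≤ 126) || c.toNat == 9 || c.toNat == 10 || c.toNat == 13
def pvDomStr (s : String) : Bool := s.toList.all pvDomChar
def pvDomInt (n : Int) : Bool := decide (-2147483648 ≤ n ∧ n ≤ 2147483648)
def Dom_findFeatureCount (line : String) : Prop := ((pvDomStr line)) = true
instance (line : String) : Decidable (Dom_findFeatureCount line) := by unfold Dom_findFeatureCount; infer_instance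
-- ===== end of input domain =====

-- B replaces A's guard branch and split-then-loop summation by the closed form
-- count('&&') + count('||') + 1 (same result; simpler, no intermediate lists).


-- ===== PORT A =====
def findFeatureCount (line : String) : Int :=
  if ¬ (PySem.Str.isIn "&&" line = true) ∧ ¬ (PySem.Str.isIn "||" line = true) then
    1
  else
    -- count = 0; for element in line.split('&&'): count += len(element.split('||'))
    (PySem.Chars.splitOn line.toList "&&".toList).foldl
      (fun (count : Int) element => count + ((PySem.Chars.splitOn element "||".toList).length : Int)) 0

-- ===== PORT B =====
def findFeatureCount_alt (line : String) : Int :=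
  (PySem.Str.count line "&&" : Int) + (PySem.Str.count line "||" : Int) + 1

-- ===== PRECONDITION & SPEC =====
def Spec_findFeatureCount (line : String) (out : Int) : Prop := out = findFeatureCount_alt line
instance (line : String) (out : Int) : Decidable (Spec_findFeatureCount line out) := by unfold Spec_findFeatureCount; infer_instance

-- ===== CLAIM (what is proved, stated in full; the proofs are below) =====
def Claim_equal_findFeatureCount : Prop := ∀ (line : String), Dom_findFeatureCount line → Spec_findFeatureCount line (findFeatureCount line)

-- ===== LEMMAS AND PROOFS =====

-- accumulator-free model of greedy splitting on a two-character separator [a, b]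
def consHead (c : Char) : List (List Char) → List (List Char)
  | [] => [[c]]
  | p :: ps => (c :: p) :: ps

def split2 (a b : Char) : List Char → List (List Char)
  | [] => [[]]
  | [c] => [[c]]
  | c :: d :: rest =>
      if c = a ∧ d = b then [] :: split2 a b rest
      else consHead c (split2 a b (d :: rest))
  termination_by l => l.length

-- accumulator-free model of greedy counting of the two-character pattern [a, b]
def count2 (a b : Char) : List Char → Nat
  | [] => 0
  | [_] => 0
  | c :: d :: rest =>
      if c = a ∧ d = b then 1 + count2 a b rest
      else count2 a b (d :: rest)
  termination_by l => l.length

lemma count2_cons_nomatch {a b c : Char} {rest : List Char}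
    (h : ¬ (c = a ∧ rest.head? = some b)) :
    count2 a b (c :: rest) = count2 a b rest := by
  cases rest with
  | nil => simp [count2]
  | cons d r =>
      have : ¬ (c = a ∧ d = b) := by simpa using h
      rw [count2, if_neg this]

lemma split2_cons_nomatch {a b c : Char} {rest : List Char}
    (h : ¬ (c = a ∧ rest.head? = some b)) :
    split2 a b (c :: rest) = consHead c (split2 a b rest) := by
  cases rest with
  | nil => simp [split2, consHead]
  | cons d r =>
      have : ¬ (c = a ∧ d = b) := by simpa using h
      rw [split2, if_neg this]

lemma split2_head (a b : Char) :
    ∀ l : List Char, ∃ h t, split2 a b l = h :: t ∧ h <+: l := by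
  intro l
  induction l using split2.induct a b with
  | case1 => exact ⟨[], [], by simp [split2], List.nil_prefix⟩
  | case2 c => exact ⟨[c], [], by simp [split2], List.prefix_refl _⟩
  | case3 c d rest hm ih =>
      exact ⟨[], _, by rw [split2, if_pos hm], List.nil_prefix⟩
  | case4 c d rest hm ih =>
      obtain ⟨h, t, heq, hpre⟩ := ih
      exact ⟨c :: h, t, by rw [split2, if_neg hm, heq, consHead], List.cons_prefix_cons.mpr ⟨rfl, hpre⟩⟩

lemma len_split2 (a b : Char) :
    ∀ l : List Char, (split2 a b l).length = count2 a b l + 1 := by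
  intro l
  induction l using split2.induct a b with
  | case1 => simp [split2, count2]
  | case2 c => simp [split2, count2]
  | case3 c d rest hm ih =>
      rw [split2, if_pos hm, count2, if_pos hm]
      simp [ih]; omega
  | case4 c d rest hm ih =>
      obtain ⟨h, t, heq, -⟩ := split2_head a b (d :: rest)
      rw [split2, if_neg hm, count2, if_neg hm, heq, consHead]
      simpa [heq] using ih

lemma count2_eq_zero_of_not_infix {a b : Char} :
    ∀ l : List Char, ¬ ([a, b] <:+: l) → count2 a b l = 0 := by
  intro l
  induction l using count2.induct a b with
  | case1 => intro _; simp [count2]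
  | case2 c => intro _; simp [count2]
  | case3 c d rest hm ih =>
      intro hn
      obtain ⟨rfl, rfl⟩ := hm
      exact absurd ⟨[], rest, by simp⟩ hn
  | case4 c d rest hm ih =>
      intro hn
      rw [count2, if_neg hm]
      exact ih fun hi => hn (hi.trans (List.suffix_cons c (d :: rest)).isInfix)

-- the central identity: summing the per-piece '||'-split lengths over the '&&'-split
-- equals count('&&') + count('||') + 1
lemma key_sum :
    ∀ l : List Char,
      ((split2 '&' '&' l).map (fun e => count2 '|' '|' e + 1)).sum
        = count2 '&' '&' l + count2 '|' '|' l + 1 := by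
  have main : ∀ n (l : List Char), l.length ≤ n →
      ((split2 '&' '&' l).map (fun e => count2 '|' '|' e + 1)).sum
        = count2 '&' '&' l + count2 '|' '|' l + 1 := by
    intro n
    induction n with
    | zero =>
        intro l hl
        have : l = [] := List.eq_nil_of_length_eq_zero (Nat.le_zero.mp hl)
        subst this; simp [split2, count2]
    | succ n ih =>
        intro l hl
        match l with
        | [] => simp [split2, count2]
        | [c] => simp [split2, count2]
        | c :: d :: rest =>
          by_cases hA : c = '&' ∧ d = '&'
          · obtain ⟨rfl, rfl⟩ := hA
            have h1 := ih rest (by simp at hl ⊢; omega)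
            rw [split2, if_pos ⟨rfl, rfl⟩, count2, if_pos ⟨rfl, rfl⟩]
            have hB2 : count2 '|' '|' ('&' :: '&' :: rest) = count2 '|' '|' rest := by
              rw [count2_cons_nomatch (by simp), count2_cons_nomatch]
              cases rest <;> simp
            rw [hB2]
            simp [h1, count2]; omega
          · by_cases hB : c = '|' ∧ d = '|'
            · obtain ⟨rfl, rfl⟩ := hB
              have h1 := ih rest (by simp at hl ⊢; omega)
              obtain ⟨h, t, heq, hpre⟩ := split2_head '&' '&' rest
              have hs : split2 '&' '&' ('|' :: '|' :: rest)
                  = ('|' :: '|' :: h) :: t := by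
                rw [split2_cons_nomatch (by cases rest <;> simp_all),
                    split2_cons_nomatch (by
                      rcases split2_head '&' '&' rest with ⟨h', t', heq', hpre'⟩
                      simp), heq, consHead, consHead]
              rw [hs, count2, if_neg (by simp), count2, if_pos ⟨rfl, rfl⟩]
              have hc : count2 '|' '|' ('|' :: '|' :: h) = 1 + count2 '|' '|' h := by
                rw [count2, if_pos ⟨rfl, rfl⟩]
              rw [heq] at h1
              simp only [List.map_cons, List.sum_cons] at h1 ⊢
              have hcA : count2 '&' '&' ('|' :: rest) = count2 '&' '&' rest := by
                rw [count2_cons_nomatch (by simp)]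
              rw [hc, hcA]; omega
            · -- neither pattern matches at the head
              have h1 := ih (d :: rest) (by simp at hl; simp; omega)
              obtain ⟨h, t, heq, hpre⟩ := split2_head '&' '&' (d :: rest)
              have hnmA : ¬ (c = '&' ∧ (d :: rest).head? = some '&') := by
                simpa using hA
              have hnmB : ¬ (c = '|' ∧ (d :: rest).head? = some '|') := by
                simpa using hB
              have hs : split2 '&' '&' (c :: d :: rest) = (c :: h) :: t := by
                rw [split2_cons_nomatch hnmA, heq, consHead]
              have hch : count2 '|' '|' (c :: h) = count2 '|' '|' h := by
                apply count2_cons_nomatch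
                rintro ⟨rfl, hh⟩
                cases h with
                | nil => simp at hh
                | cons x h' =>
                    simp at hh; subst hh
                    have : d = '|' := by
                      have := List.cons_prefix_cons.mp hpre
                      simpa using this.1.symm
                    exact hnmB ⟨rfl, by simp [this]⟩
              rw [hs]
              rw [heq] at h1
              simp only [List.map_cons, List.sum_cons] at h1 ⊢
              rw [hch, count2_cons_nomatch hnmA, count2_cons_nomatch hnmB]
              omega
  exact fun l => main l.length l le_rfl

-- bridge: PySem's fuel-based count.go computes count2
lemma countGo_eq_count2 (a b : Char) :
    ∀ (fuel : Nat) (l : List Char) (acc : Nat), l.length ≤ fuel →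
      PySem.Chars.count.go [a, b] fuel l acc = acc + count2 a b l := by
  intro fuel
  induction fuel with
  | zero =>
      intro l acc hl
      have : l = [] := List.eq_nil_of_length_eq_zero (Nat.le_zero.mp hl)
      subst this; simp [PySem.Chars.count.go, count2]
  | succ n ih =>
      intro l acc hl
      match l with
      | [] => simp [PySem.Chars.count.go, count2]
      | c :: rest =>
        rw [PySem.Chars.count.go]
        cases rest with
        | nil =>
            rw [if_neg (by simp [List.isPrefixOf]), ih [] acc (by simp)]
            simp [count2]
        | cons d r =>
            by_cases hab : c = a ∧ d = b
            · obtain ⟨rfl, rfl⟩ := hab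
              rw [if_pos (by simp [List.isPrefixOf])]
              have := ih r (acc + 1) (by simp at hl ⊢; omega)
              simp only [List.length_cons, List.drop_succ_cons, List.length_nil, List.drop_zero] at this ⊢
              rw [this, count2, if_pos ⟨rfl, rfl⟩]
              omega
            · rw [if_neg (by
                  intro hcon
                  simp [List.isPrefixOf] at hcon
                  exact hab ⟨hcon.1.symm, hcon.2.symm⟩)]
              rw [ih (d :: r) acc (by simp at hl ⊢; omega),
                  count2, if_neg hab]
  
-- bridge: PySem's fuel-based splitOn.go computes split2 (acc/cur made explicit)
def preHead (pre : List Char) : List (List Char) → List (List Char)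
  | [] => [pre]
  | p :: ps => (pre ++ p) :: ps

lemma splitGo_eq_split2 (a b : Char) :
    ∀ (fuel : Nat) (l cur : List Char) (acc : List (List Char)), l.length ≤ fuel →
      PySem.Chars.splitOn.go [a, b] fuel l cur acc
        = acc.reverse ++ preHead cur.reverse (split2 a b l) := by
  intro fuel
  induction fuel with
  | zero =>
      intro l cur acc hl
      have : l = [] := List.eq_nil_of_length_eq_zero (Nat.le_zero.mp hl)
      subst this; simp [PySem.Chars.splitOn.go, split2, preHead]
  | succ n ih =>
      intro l cur acc hl
      match l with
      | [] => simp [PySem.Chars.splitOn.go, split2, preHead]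
      | c :: rest =>
        rw [PySem.Chars.splitOn.go]
        cases rest with
        | nil =>
            rw [if_neg (by simp [List.isPrefixOf]), ih [] (c :: cur) acc (by simp)]
            simp [split2, preHead]
        | cons d r =>
            by_cases hab : c = a ∧ d = b
            · obtain ⟨rfl, rfl⟩ := hab
              rw [if_pos (by simp [List.isPrefixOf])]
              have := ih r [] (cur.reverse :: acc) (by simp at hl ⊢; omega)
              simp only [List.length_cons, List.drop_succ_cons, List.length_nil, List.drop_zero] at this ⊢
              rw [this, split2, if_pos ⟨rfl, rfl⟩]
              obtain ⟨h, t, heq, -⟩ := split2_head c d r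
              simp [preHead, heq]
            · rw [if_neg (by
                  intro hcon
                  simp [List.isPrefixOf] at hcon
                  exact hab ⟨hcon.1.symm, hcon.2.symm⟩)]
              rw [ih (d :: r) (c :: cur) acc (by simp at hl ⊢; omega),
                  split2, if_neg hab]
              obtain ⟨h, t, heq, -⟩ := split2_head a b (d :: r)
              simp [heq, preHead, consHead]
  
lemma splitOn_eq_split2 (a b : Char) (l : List Char) :
    PySem.Chars.splitOn l [a, b] = split2 a b l := by
  rw [PySem.Chars.splitOn, splitGo_eq_split2 a b _ l [] [] (by omega)]
  obtain ⟨h, t, heq, -⟩ := split2_head a b l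
  simp [heq, preHead]

lemma count_eq_count2 (a b : Char) (l : List Char) :
    PySem.Chars.count l [a, b] = count2 a b l := by
  rw [PySem.Chars.count]
  simp only [List.isEmpty_cons, if_false, Bool.false_eq_true]
  exact (countGo_eq_count2 a b l.length l 0 le_rfl).trans (by omega)

-- ===== VERDICT (by name: the statement is the Claim_ definition above) =====
theorem findFeatureCount_spec : Claim_equal_findFeatureCount := by
  intro line _
  unfold Spec_findFeatureCount findFeatureCount findFeatureCount_alt
  have hamp : ("&&" : String).toList = ['&', '&'] := rfl
  have hbar : ("||" : String).toList = ['|', '|'] := rfl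
  have hcA : PySem.Str.count line "&&" = count2 '&' '&' line.toList := by
    rw [PySem.Str.count, hamp, count_eq_count2]
  have hcB : PySem.Str.count line "||" = count2 '|' '|' line.toList := by
    rw [PySem.Str.count, hbar, count_eq_count2]
  split_ifs with h
  · -- neither separator occurs: both counts are 0
    obtain ⟨h1, h2⟩ := h
    have z1 : count2 '&' '&' line.toList = 0 := by
      apply count2_eq_zero_of_not_infix
      rw [← hamp]
      exact (PySem.Str.isIn_iff_infix _ _).not.mp h1
    have z2 : count2 '|' '|' line.toList = 0 := by
      apply count2_eq_zero_of_not_infix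
      rw [← hbar]
      exact (PySem.Str.isIn_iff_infix _ _).not.mp h2
    rw [hcA, hcB, z1, z2]; rfl
  · rw [hamp, hbar, splitOn_eq_split2, hcA, hcB]
    have hfold :
        (split2 '&' '&' line.toList).foldl
            (fun (count : Int) element =>
              count + ((PySem.Chars.splitOn element ['|', '|']).length : Int)) 0
          = ((split2 '&' '&' line.toList).map
              (fun e => ((split2 '|' '|' e).length : Int))).sum := by
      rw [PySem.List.foldl_add]
      simp only [splitOn_eq_split2, zero_add]
    rw [hfold]
    have hmap :
        ((split2 '&' '&' line.toList).map
            (fun e => ((split2 '|' '|' e).length : Int))).sum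
          = (((split2 '&' '&' line.toList).map
              (fun e => count2 '|' '|' e + 1)).sum : Nat) := by
      rw [Nat.cast_list_sum, List.map_map]
      congr 1
      apply List.map_congr_left
      intro e _
      simp [len_split2]
    rw [hmap, key_sum]
    push_cast; ring
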